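-- pv_equiv track=rewrite | github.com/akent4000/Universal-Gate-Compiler | nand_optimizer/core/implicant.py | _cube_masks
-- ===== SOURCE A (Python) =====
-- from typing import Dict, FrozenSet, List, Set, Tuple
--
-- DASH = -1  # wildcard / don't-care position in a ternary cube
--
-- def _cube_masks(cube: Tuple[int, ...]) -> Tuple[int, int]:
--     """Ternary cube → (care, value) int bit-masks (MSB = bit `n-1`)."""
--     n = len(cube)
--     care = 0
--     value = 0
--     for i, b in enumerate(cube):
--         if b == DASH:
--             continue
--         pos = n - 1 - i
--         care |= 1 << pos
--         if b == 1:
--             value |= 1 << pos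
--     return care, value
-- ===== SOURCE B (Python) =====
-- from typing import Dict, FrozenSet, List, Set, Tuple
--
-- DASH = -1  # wildcard / don't-care position in a ternary cube
--
-- def _cube_masks(cube: Tuple[int, ...]) -> Tuple[int, int]:
--     """Ternary cube -> (care, value) masks via binary-string rendering.
--
--     Stage 1: render the cube as two binary digit strings (MSB first);
--     Stage 2: let int(..., 2) parse them.  No bit arithmetic at all.
--     """
--     care_bits = ''.join('0' if b == DASH else '1' for b in cube)
--     value_bits = ''.join('1' if b == 1 else '0' for b in cube)
--     return int(care_bits or '0', 2), int(value_bits or '0', 2)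
-- ===== Notes on version B (the rewrite author's own statement) =====
-- stated objective: faster
-- what changed: Replaced the indexed bit-setting loop (pos = n-1-i, care |= 1<<pos, quadratic big-int work) by a two-stage rendering: the cube is mapped to two MSB-first binary digit strings and int(s, 2) parses each, so B contains no bit arithmetic or index bookkeeping at all.
import Mathlib
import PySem

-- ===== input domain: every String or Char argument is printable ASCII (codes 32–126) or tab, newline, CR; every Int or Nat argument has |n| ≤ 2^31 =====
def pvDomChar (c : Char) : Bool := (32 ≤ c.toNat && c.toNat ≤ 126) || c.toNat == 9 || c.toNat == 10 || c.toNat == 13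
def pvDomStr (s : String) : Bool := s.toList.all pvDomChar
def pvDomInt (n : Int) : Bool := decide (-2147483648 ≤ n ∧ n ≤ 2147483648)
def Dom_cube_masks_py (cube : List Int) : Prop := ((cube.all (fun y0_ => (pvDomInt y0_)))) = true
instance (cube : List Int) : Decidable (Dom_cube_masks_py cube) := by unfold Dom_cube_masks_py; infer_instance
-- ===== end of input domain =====

-- B replaces A's indexed bit-setting (pos = n-1-i, care |= 1<<pos) by two staged passes:
-- render the cube as two binary digit strings and parse them base 2 (no bit arithmetic).

-- ===== PORT A =====
-- step of A's loop; `pos` is n-1-i, an Int ≥ 0 whenever the loop body runs, so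
-- `.toNat` on it is exact (Python's 1 << pos with pos ≥ 0).
def cubeMasksStepA (n : Int) (acc : Int × Int) (ib : Int × Int) : Int × Int :=
  if ib.2 == -1 then acc
  else
    let pos : Int := n - 1 - ib.1
    let care := PySem.Int.bor acc.1 ((1 : Int) <<< pos.toNat)
    let value := if ib.2 == 1 then PySem.Int.bor acc.2 ((1 : Int) <<< pos.toNat) else acc.2
    (care, value)

def cube_masks_py (cube : List Int) : Int × Int :=
  let n : Int := cube.length
  (PySem.List.enumerate cube).foldl (cubeMasksStepA n) (0, 0)

-- ===== PORT B =====
-- Strings are represented by their character lists (the digits are ASCII, so this is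
-- exact); int(s, 2) is ported as the standard base-2 digit fold.
def parseBin (l : List Char) : Int :=
  l.foldl (fun a c => a * 2 + (if c == '1' then (1 : Int) else 0)) 0

def cube_masks_py_alt (cube : List Int) : Int × Int :=
  let careBits : List Char := cube.map (fun b => if b == -1 then '0' else '1')
  let valueBits : List Char := cube.map (fun b => if b == 1 then '1' else '0')
  (parseBin (if careBits = [] then ['0'] else careBits),
   parseBin (if valueBits = [] then ['0'] else valueBits))

-- ===== PRECONDITION & SPEC =====
def Spec_cube_masks_py (cube : List Int) (out : Int × Int) : Prop := out = cube_masks_py_alt cube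
instance (cube : List Int) (out : Int × Int) : Decidable (Spec_cube_masks_py cube out) := by unfold Spec_cube_masks_py; infer_instance

-- ===== CLAIM (what is proved, stated in full; the proofs are below) =====
def Claim_equal_cube_masks_py : Prop := ∀ (cube : List Int), Dom_cube_masks_py cube → Spec_cube_masks_py cube (cube_masks_py cube)

-- ===== LEMMAS AND PROOFS =====

-- doubling both arguments commutes with bitwise or
theorem two_mul_lor (x y : Nat) : (2 * x) ||| (2 * y) = 2 * (x ||| y) := by
  have h := Nat.lor_bit false x false y
  simpa [Nat.bit, Nat.two_mul] using h

-- a*2^(k+1) and 2^k have disjoint bits, so OR is addition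
theorem lor_mul_two_pow_succ (k a : Nat) : (a * 2 ^ (k + 1)) ||| 2 ^ k = a * 2 ^ (k + 1) + 2 ^ k := by
  induction k generalizing a with
  | zero =>
    have h := Nat.lor_bit false a true 0
    simp [Nat.bit] at h
    have e : a * 2 ^ (0 + 1) = 2 * a := by ring
    rw [e, pow_zero, h]
  | succ k ih =>
    calc a * 2 ^ (k + 2) ||| 2 ^ (k + 1)
        = (2 * (a * 2 ^ (k + 1))) ||| (2 * 2 ^ k) := by congr 1 <;> ring
      _ = 2 * ((a * 2 ^ (k + 1)) ||| 2 ^ k) := two_mul_lor _ _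
      _ = 2 * (a * 2 ^ (k + 1) + 2 ^ k) := by rw [ih]
      _ = a * 2 ^ (k + 2) + 2 ^ (k + 1) := by ring

theorem int_bor_shift (k c : Nat) :
    PySem.Int.bor ((c : Int) * 2 ^ (k + 1)) ((1 : Int) <<< k) = (c : Int) * 2 ^ (k + 1) + 2 ^ k := by
  have hs : ((1 : Int) <<< k) = ((2 ^ k : Nat) : Int) := by
    simp [Int.shiftLeft_eq]
  have hm : ((c : Int) * 2 ^ (k + 1)) = ((c * 2 ^ (k + 1) : Nat) : Int) := by push_cast; ring
  rw [hs, hm, PySem.Int.bor_natCast, lor_mul_two_pow_succ]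
  push_cast; ring

-- A's fold, with scaled accumulators, computes the two base-2 digit parses of B's strings
theorem fold_invariant (n : Int) :
    ∀ (xs : List Int) (s : Int) (c v : Nat), s + (xs.length : Int) = n →
    List.foldl (cubeMasksStepA n)
      ((c : Int) * 2 ^ xs.length, (v : Int) * 2 ^ xs.length) (PySem.List.enumerate xs s)
    = ((xs.map (fun b => if b == -1 then '0' else '1')).foldl
         (fun a ch => a * 2 + (if ch == '1' then (1 : Int) else 0)) (c : Int),
       (xs.map (fun b => if b == 1 then '1' else '0')).foldl
         (fun a ch => a * 2 + (if ch == '1' then (1 : Int) else 0)) (v : Int)) := by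
  intro xs
  induction xs with
  | nil => intro s c v _; simp [PySem.List.enumerate]
  | cons b t ih =>
    intro s c v hn
    rw [PySem.List.enumerate_cons]
    simp only [List.foldl_cons, List.map_cons]
    have hlen : ((b :: t).length : Int) = (t.length : Int) + 1 := by simp
    have hts : (n - 1 - s).toNat = t.length := by omega
    by_cases hb : b = -1
    · have hA : cubeMasksStepA n ((c : Int) * 2 ^ (b :: t).length, (v : Int) * 2 ^ (b :: t).length) (s, b)
          = ((((c * 2 : Nat)) : Int) * 2 ^ t.length, (((v * 2 : Nat)) : Int) * 2 ^ t.length) := by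
        simp [cubeMasksStepA, hb]
        constructor <;> (push_cast; ring)
      rw [hA, ih (s + 1) (c * 2) (v * 2) (by rw [← hn, hlen]; ring)]
      simp [hb]
    · by_cases h1 : b = 1
      · have hA : cubeMasksStepA n ((c : Int) * 2 ^ (b :: t).length, (v : Int) * 2 ^ (b :: t).length) (s, b)
            = ((((c * 2 + 1 : Nat)) : Int) * 2 ^ t.length, (((v * 2 + 1 : Nat)) : Int) * 2 ^ t.length) := by
          simp only [cubeMasksStepA, List.length_cons, hts]
          rw [if_neg (by simp [hb]), if_pos (by simp [h1])]
          simp only [Prod.mk.injEq]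
          constructor <;> (rw [int_bor_shift]; push_cast; ring)
        rw [hA, ih (s + 1) (c * 2 + 1) (v * 2 + 1) (by rw [← hn, hlen]; ring)]
        simp [h1]
      · have hA : cubeMasksStepA n ((c : Int) * 2 ^ (b :: t).length, (v : Int) * 2 ^ (b :: t).length) (s, b)
            = ((((c * 2 + 1 : Nat)) : Int) * 2 ^ t.length, (((v * 2 : Nat)) : Int) * 2 ^ t.length) := by
          simp only [cubeMasksStepA, List.length_cons, hts]
          rw [if_neg (by simp [hb]), if_neg (by simp [h1])]
          simp only [Prod.mk.injEq]
          constructor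
          · rw [int_bor_shift]; push_cast; ring
          · push_cast; ring
        rw [hA, ih (s + 1) (c * 2 + 1) (v * 2) (by rw [← hn, hlen]; ring)]
        simp [hb, h1]

-- ===== VERDICT (by name: the statement is the Claim_ definition above) =====
theorem cube_masks_py_spec : Claim_equal_cube_masks_py := by
  intro cube _
  unfold Spec_cube_masks_py cube_masks_py cube_masks_py_alt parseBin
  cases cube with
  | nil => decide
  | cons x t =>
    have h := fold_invariant ((x :: t).length : Int) (x :: t) 0 0 0 (by simp)
    simpa using h
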